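-- pv_equiv track=rewrite | github.com/GiliWolf/python_for_bioinformatics | exercise4_315144907.py | prosite_patterns_into_regex
-- ===== SOURCE A (Python) =====
-- def prosite_patterns_into_regex(prosite_patterns_list):
--     regex_list = []
--     for prosite in prosite_patterns_list:
--         pattern = str(prosite[0])
--         pattern = pattern.replace("-", "")
--         pattern = pattern.replace("X", ".")
--         pattern = pattern.replace("x", ".")
--         pattern = pattern.replace("{","[^").replace("}", "]")
--         pattern = pattern.replace("(","{").replace(")", "}")
--         pattern = pattern.replace("<", r"\A")
--         pattern = pattern.replace(">", r"\Z")
--         raw_string = r"{}".format(pattern)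
--         regex_list.append((raw_string, prosite[1]))
--     return regex_list
-- ===== SOURCE B (Python) =====
-- TABLE = [("-", ""), ("X", "."), ("x", "."), ("{", "[^"), ("}", "]"),
--          ("(", "{"), (")", "}"), ("<", "\\A"), (">", "\\Z")]
--
-- def _convert(s, rules):
--     # divide and conquer: split on the first rule's separator, convert the
--     # pieces under the remaining rules, join with the replacement.  The
--     # replacement text is inserted after the recursion, so it is never
--     # rescanned by any later rule.
--     if not rules:
--         return s
--     (sep, rep), rest = rules[0], rules[1:]
--     return rep.join(_convert(piece, rest) for piece in s.split(sep))
--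
-- def prosite_patterns_into_regex(prosite_patterns_list):
--     return [(_convert(str(p[0]), TABLE), p[1]) for p in prosite_patterns_list]
-- ===== Notes on version B (the rewrite author's own statement) =====
-- stated objective: alternative
-- what changed: Replaces A's seven sequential whole-string replace passes (each rescanning the partially rewritten string) with a recursive divide-and-conquer over the rule list: split the pattern on the first rule's separator, recursively convert each piece under the remaining rules, and join with the replacement, so replacement text is produced after the recursion and never rescanned.
import Mathlib
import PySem

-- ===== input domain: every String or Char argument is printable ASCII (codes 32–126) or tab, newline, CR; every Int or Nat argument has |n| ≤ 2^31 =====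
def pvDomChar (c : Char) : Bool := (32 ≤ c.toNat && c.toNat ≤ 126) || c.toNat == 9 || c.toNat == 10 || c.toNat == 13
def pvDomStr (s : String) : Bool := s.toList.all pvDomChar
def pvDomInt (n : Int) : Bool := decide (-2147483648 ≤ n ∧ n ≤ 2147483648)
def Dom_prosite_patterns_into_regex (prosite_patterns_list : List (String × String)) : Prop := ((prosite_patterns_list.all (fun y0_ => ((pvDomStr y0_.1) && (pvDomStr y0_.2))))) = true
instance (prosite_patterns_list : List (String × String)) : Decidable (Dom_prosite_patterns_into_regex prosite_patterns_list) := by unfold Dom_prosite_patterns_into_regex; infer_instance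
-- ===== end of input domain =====

-- B replaces A's seven sequential whole-string replace passes by a recursive
-- divide-and-conquer over the rule list (split on the separator, convert the
-- pieces under the remaining rules, join with the replacement); return values
-- proved equal.


-- ===== PORT A =====
-- the seven sequential replace passes, in A's order, on one pattern
def pvAPattern (pat0 : String) : String :=
  let pattern := pat0
  let pattern := PySem.Str.replace pattern "-" ""
  let pattern := PySem.Str.replace pattern "X" "."
  let pattern := PySem.Str.replace pattern "x" "."
  let pattern := PySem.Str.replace (PySem.Str.replace pattern "{" "[^") "}" "]"
  let pattern := PySem.Str.replace (PySem.Str.replace pattern "(" "{") ")" "}"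
  let pattern := PySem.Str.replace pattern "<" "\\A"
  let pattern := PySem.Str.replace pattern ">" "\\Z"
  pattern

def prosite_patterns_into_regex (prosite_patterns_list : List (String × String)) : List (String × String) :=
  prosite_patterns_list.foldl (fun regex_list prosite =>
    regex_list ++ [(pvAPattern prosite.1, prosite.2)]) []

-- ===== PORT B =====
-- Source B's TABLE: (separator, replacement) rules; single-char separators as Char,
-- replacements as code-point lists (port works on List Char via String.toList)
def pvTABLE : List (Char × List Char) :=
  [('-', []), ('X', ['.']), ('x', ['.']), ('{', ['[', '^']), ('}', [']']),
   ('(', ['{']), (')', ['}']), ('<', ['\\', 'A']), ('>', ['\\', 'Z'])]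

-- Source B's _convert: split on the first rule's separator, recurse on the pieces
-- with the remaining rules, join with the replacement
def pvConvert : List (Char × List Char) → List Char → List Char
  | [], s => s
  | (sep, rep) :: rest, s =>
      PySem.Chars.join rep ((PySem.Chars.splitOn s [sep]).map (pvConvert rest))

def prosite_patterns_into_regex_alt (prosite_patterns_list : List (String × String)) : List (String × String) :=
  prosite_patterns_list.map (fun p => (String.ofList (pvConvert pvTABLE p.1.toList), p.2))

-- ===== PRECONDITION & SPEC =====
def Spec_prosite_patterns_into_regex (prosite_patterns_list : List (String × String)) (out : List (String × String)) : Prop := out = prosite_patterns_into_regex_alt prosite_patterns_list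
instance (prosite_patterns_list : List (String × String)) (out : List (String × String)) : Decidable (Spec_prosite_patterns_into_regex prosite_patterns_list out) := by unfold Spec_prosite_patterns_into_regex; infer_instance

-- ===== CLAIM (what is proved, stated in full; the proofs are below) =====
def Claim_equal_prosite_patterns_into_regex : Prop := ∀ (prosite_patterns_list : List (String × String)), Dom_prosite_patterns_into_regex prosite_patterns_list → Spec_prosite_patterns_into_regex prosite_patterns_list (prosite_patterns_into_regex prosite_patterns_list)

-- ===== LEMMAS AND PROOFS =====

-- specification of single-char split (matches Python str.split on a 1-char sep)
def pvSplitC (o : Char) : List Char → List (List Char)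
  | [] => [[]]
  | c :: t =>
      if c = o then [] :: pvSplitC o t
      else match pvSplitC o t with
           | [] => [[c]]        -- unreachable: pvSplitC never returns []
           | h :: r => (c :: h) :: r

def pvConsHead (p : List Char) : List (List Char) → List (List Char)
  | [] => [p]
  | h :: t => (p ++ h) :: t

theorem pvSplitC_ne_nil (o : Char) (l : List Char) : pvSplitC o l ≠ [] := by
  cases l with
  | nil => simp [pvSplitC]
  | cons c t =>
      simp only [pvSplitC]
      split
      · simp
      · split <;> simp

theorem pvConsHead_nil {sp : List (List Char)} (h : sp ≠ []) : pvConsHead [] sp = sp := by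
  cases sp with
  | nil => exact absurd rfl h
  | cons a r => simp [pvConsHead]

theorem splitOn_go_single (o : Char) :
    ∀ (fuel : Nat) (l cur : List Char) (acc : List (List Char)), l.length ≤ fuel →
      PySem.Chars.splitOn.go [o] fuel l cur acc =
        acc.reverse ++ pvConsHead cur.reverse (pvSplitC o l) := by
  intro fuel
  induction fuel with
  | zero =>
      intro l cur acc h
      simp at h; subst h
      simp [PySem.Chars.splitOn.go, pvSplitC, pvConsHead]
  | succ n ih =>
      intro l cur acc h
      cases l with
      | nil => simp [PySem.Chars.splitOn.go, pvSplitC, pvConsHead]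
      | cons c t =>
          simp only [PySem.Chars.splitOn.go, List.isPrefixOf, Bool.and_true]
          by_cases hc : c = o
          · subst hc
            simp only [beq_self_eq_true, if_true, List.length_cons, List.length_nil,
              List.drop_succ_cons, List.drop_zero]
            rw [ih t [] (cur.reverse :: acc) (by simpa using h)]
            simp only [List.reverse_cons, List.reverse_nil,
              pvConsHead_nil (pvSplitC_ne_nil c t)]
            simp [pvSplitC, pvConsHead, List.append_assoc]
          · have hoc : (o == c) = false := by
              simp [beq_eq_false_iff_ne]; exact fun e => hc e.symm
            simp only [hoc, Bool.false_eq_true, if_false]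
            rw [ih t (c :: cur) acc (by simpa using h)]
            cases hsp : pvSplitC o t with
            | nil => exact absurd hsp (pvSplitC_ne_nil o t)
            | cons hd r =>
                simp [pvSplitC, hc, hsp, pvConsHead, List.append_assoc]

theorem splitOn_single (o : Char) (s : List Char) :
    PySem.Chars.splitOn s [o] = pvSplitC o s := by
  rw [PySem.Chars.splitOn, splitOn_go_single o (s.length + 1) s [] [] (by omega)]
  simp [pvConsHead_nil (pvSplitC_ne_nil o s)]

-- join rep ((a ++ x) :: m) peels the prefix off the head
theorem join_cons_append (rep a x : List Char) (m : List (List Char)) :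
    PySem.Chars.join rep ((a ++ x) :: m) = a ++ PySem.Chars.join rep (x :: m) := by
  cases m with
  | nil => simp [PySem.Chars.join_singleton]
  | cons b r =>
      rw [PySem.Chars.join_cons_cons, PySem.Chars.join_cons_cons]
      simp [List.append_assoc]

-- the key identity: converting the pieces and joining with the replacement is
-- one character-level flatMap over the original string
theorem join_map_split (o : Char) (rep : List Char) (g : Char → List Char) (l : List Char) :
    PySem.Chars.join rep ((pvSplitC o l).map (fun p => p.flatMap g)) =
      l.flatMap (fun x => if x = o then rep else g x) := by
  induction l with
  | nil => simp [pvSplitC, PySem.Chars.join_singleton]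
  | cons c t ih =>
      by_cases hc : c = o
      · subst hc
        cases hsp : pvSplitC c t with
        | nil => exact absurd hsp (pvSplitC_ne_nil c t)
        | cons hd r =>
            rw [hsp] at ih
            have h1 : pvSplitC c (c :: t) = [] :: hd :: r := by simp [pvSplitC, hsp]
            rw [h1, List.map_cons, List.map_cons, PySem.Chars.join_cons_cons,
              List.flatMap_cons, if_pos rfl]
            simp only [List.map_cons] at ih
            rw [ih]
            simp
      · cases hsp : pvSplitC o t with
        | nil => exact absurd hsp (pvSplitC_ne_nil o t)
        | cons hd r =>
            rw [hsp] at ih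
            have h1 : pvSplitC o (c :: t) = (c :: hd) :: r := by simp [pvSplitC, hc, hsp]
            rw [h1, List.map_cons]
            have h2 : (c :: hd).flatMap g = g c ++ hd.flatMap g := by simp
            rw [h2, join_cons_append]
            simp only [List.map_cons] at ih
            rw [ih, List.flatMap_cons, if_neg hc]

-- the per-character map induced by a rule list
def pvTblOf : List (Char × List Char) → Char → List Char
  | [], x => [x]
  | (c, rep) :: rest, x => if x = c then rep else pvTblOf rest x

theorem pvConvert_eq_flatMap (T : List (Char × List Char)) (s : List Char) :
    pvConvert T s = s.flatMap (pvTblOf T) := by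
  induction T generalizing s with
  | nil => simp [pvConvert, pvTblOf]
  | cons p rest ih =>
      obtain ⟨c, rep⟩ := p
      show PySem.Chars.join rep ((PySem.Chars.splitOn s [c]).map (pvConvert rest)) = _
      rw [splitOn_single]
      rw [List.map_congr_left (fun x _ => ih x)]
      rw [join_map_split]
      simp [pvTblOf]

-- single-char replace is a per-character flatMap
theorem replace_go_single (o : Char) (new : List Char) :
    ∀ (fuel : Nat) (l acc : List Char), l.length ≤ fuel →
      PySem.Chars.replace.go [o] new fuel l acc =
        acc.reverse ++ l.flatMap (fun c => if c = o then new else [c]) := by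
  intro fuel
  induction fuel with
  | zero => intro l acc h; simp at h; subst h; simp [PySem.Chars.replace.go]
  | succ n ih =>
    intro l acc h
    cases l with
    | nil => simp [PySem.Chars.replace.go]
    | cons c t =>
      simp only [PySem.Chars.replace.go, List.isPrefixOf, Bool.and_true]
      by_cases hc : c = o
      · subst hc
        simp only [beq_self_eq_true, if_true, List.length_cons, List.length_nil,
          List.drop_succ_cons, List.drop_zero]
        rw [ih t _ (by simpa using h)]
        simp [List.flatMap_cons]
      · have : (o == c) = false := by simp [beq_eq_false_iff_ne]; exact fun e => hc e.symm
        simp only [this, Bool.false_eq_true, if_false]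
        rw [ih t _ (by simpa using h)]
        simp [List.flatMap_cons, hc]

theorem replace_single (s : List Char) (o : Char) (new : List Char) :
    PySem.Chars.replace s [o] new = s.flatMap (fun c => if c = o then new else [c]) := by
  rw [PySem.Chars.replace]
  simp only [List.isEmpty_cons, Bool.false_eq_true, if_false]
  rw [replace_go_single o new s.length s [] le_rfl]
  simp

-- the composed per-character action of A's seven passes equals B's rule-list map
theorem table_eq (c : Char) :
    List.flatMap
      (fun x =>
        List.flatMap
          (fun x =>
            List.flatMap
              (fun x =>
                List.flatMap
                  (fun x =>
                    List.flatMap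
                      (fun x =>
                        List.flatMap
                          (fun x =>
                            List.flatMap
                              (fun x =>
                                List.flatMap (fun c => if c = '>' then ['\\', 'Z'] else [c])
                                  (if x = '<' then ['\\', 'A'] else [x]))
                              (if x = ')' then ['}'] else [x]))
                          (if x = '(' then ['{'] else [x]))
                      (if x = '}' then [']'] else [x]))
                  (if x = '{' then ['[', '^'] else [x]))
              (if x = 'x' then ['.'] else [x]))
          (if x = 'X' then ['.'] else [x]))
      (if c = '-' then [] else [c]) = pvTblOf pvTABLE c := by
  by_cases h1 : c = '-'; · subst h1; decide
  by_cases h2 : c = 'X'; · subst h2; decide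
  by_cases h3 : c = 'x'; · subst h3; decide
  by_cases h4 : c = '{'; · subst h4; decide
  by_cases h5 : c = '}'; · subst h5; decide
  by_cases h6 : c = '('; · subst h6; decide
  by_cases h7 : c = ')'; · subst h7; decide
  by_cases h8 : c = '<'; · subst h8; decide
  by_cases h9 : c = '>'; · subst h9; decide
  simp [pvTABLE, pvTblOf, h1, h2, h3, h4, h5, h6, h7, h8, h9]

set_option maxHeartbeats 1000000 in
theorem pvAPattern_eq (s : String) :
    pvAPattern s = String.ofList (s.toList.flatMap (pvTblOf pvTABLE)) := by
  apply String.toList_injective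
  rw [String.toList_ofList]
  unfold pvAPattern
  simp only [PySem.Str.toList_replace]
  rw [show ("-" : String).toList = ['-'] from rfl, show ("" : String).toList = [] from rfl,
    show ("X" : String).toList = ['X'] from rfl, show ("x" : String).toList = ['x'] from rfl,
    show ("." : String).toList = ['.'] from rfl, show ("{" : String).toList = ['{'] from rfl,
    show ("[^" : String).toList = ['[', '^'] from rfl, show ("}" : String).toList = ['}'] from rfl,
    show ("]" : String).toList = [']'] from rfl, show ("(" : String).toList = ['('] from rfl,
    show (")" : String).toList = [')'] from rfl, show ("<" : String).toList = ['<'] from rfl,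
    show ("\\A" : String).toList = ['\\', 'A'] from rfl, show (">" : String).toList = ['>'] from rfl,
    show ("\\Z" : String).toList = ['\\', 'Z'] from rfl]
  rw [replace_single, replace_single, replace_single, replace_single, replace_single,
    replace_single, replace_single, replace_single, replace_single]
  simp only [List.flatMap_assoc]
  apply List.flatMap_congr
  intro c _
  exact table_eq c

theorem foldl_eq_map (l : List (String × String)) (acc : List (String × String)) :
    l.foldl (fun regex_list prosite =>
      regex_list ++ [(pvAPattern prosite.1, prosite.2)]) acc =
    acc ++ l.map (fun p => (pvAPattern p.1, p.2)) := by
  induction l generalizing acc with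
  | nil => simp
  | cons h t ih => rw [List.foldl_cons, ih]; simp

-- ===== VERDICT (by name: the statement is the Claim_ definition above) =====
theorem prosite_patterns_into_regex_spec : Claim_equal_prosite_patterns_into_regex := by
  intro l _
  show prosite_patterns_into_regex l = prosite_patterns_into_regex_alt l
  unfold prosite_patterns_into_regex prosite_patterns_into_regex_alt
  rw [foldl_eq_map, List.nil_append]
  apply List.map_congr_left
  intro p _
  rw [pvAPattern_eq, pvConvert_eq_flatMap]
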